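-- pv_equiv track=rewrite | github.com/Ogamiq/recruitment-tasks- | task_1/hack_power_extra.py | hack_calculator_extra
-- ===== SOURCE A (Python) =====
-- def hack_calculator_extra(hack, letters, phrases):
--     #returns a value of a hack based on a dynamically provided dictionaries
--     #of letters and it's values and of phrases and it's values
--     #first by counting number of occurrences of each letter and phrase and assigning them to the dictionaries
--     #than by using those counts and values for letters and phrases to compute and return the final result.
--
--     letters_counts = dict.fromkeys(letters.keys(),0)
--     for letter in hack:
--         if letter in letters_counts.keys():
--             letters_counts[letter] += 1
--
--     phrases_counts = dict.fromkeys(phrases.keys(),0)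
--     for key in phrases_counts:
--         phrases_counts[key] = hack.count(key)
--
--     letters_score = 0
--     for key in letters:
--         letters_score += letters[key]*sum(range(letters_counts[key]+1))
--
--     phrases_score = 0
--     for key in phrases:
--         phrases_score += phrases[key]*phrases_counts[key]
--
--     return letters_score + phrases_score
-- ===== SOURCE B (Python) =====
-- def hack_calculator_extra(hack, letters, phrases):
--     # One fused pass over hack: incrementally accumulate letters[ch]*(1+2+...+count)
--     # via the running count, instead of counting first and reducing afterwards.
--     counts = {}
--     score = 0
--     for ch in hack:
--         v = letters.get(ch)
--         if v is not None:
--             c = counts.get(ch, 0) + 1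
--             counts[ch] = c
--             score += v * c
--     for key, value in phrases.items():
--         score += value * hack.count(key)
--     return score
-- ===== Notes on version B (the rewrite author's own statement) =====
-- stated objective: alternative
-- what changed: B replaces A's two-phase letter scoring (build a counts dict over hack, then a separate reduce loop computing value*sum(range(count+1))) by a single fused pass over hack that keeps running counts and accumulates value*c incrementally via the triangular-number identity; phrase scoring stays one loop over hack.count.
import Mathlib
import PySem

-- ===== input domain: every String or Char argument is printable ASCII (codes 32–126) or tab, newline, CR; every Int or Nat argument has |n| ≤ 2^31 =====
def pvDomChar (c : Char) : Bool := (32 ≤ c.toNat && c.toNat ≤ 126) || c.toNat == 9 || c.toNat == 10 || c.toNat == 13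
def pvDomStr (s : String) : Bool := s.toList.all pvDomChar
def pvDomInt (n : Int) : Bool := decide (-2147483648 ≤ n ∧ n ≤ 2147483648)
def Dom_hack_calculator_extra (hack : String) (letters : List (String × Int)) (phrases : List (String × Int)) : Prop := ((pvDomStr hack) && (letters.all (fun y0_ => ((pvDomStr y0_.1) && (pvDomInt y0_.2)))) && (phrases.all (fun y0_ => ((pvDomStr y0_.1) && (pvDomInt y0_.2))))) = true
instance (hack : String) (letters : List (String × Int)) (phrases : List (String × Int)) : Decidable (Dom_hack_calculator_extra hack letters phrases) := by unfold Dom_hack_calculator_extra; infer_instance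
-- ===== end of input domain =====

-- B fuses A's count-then-reduce letter scoring into one pass over `hack` using the
-- triangular-number increment (same cost class; objective: alternative decomposition).

-- ===== PORT A =====
def hack_calculator_extra (hack : String) (letters : List (String × Int)) (phrases : List (String × Int)) : Int :=
  let letters_counts : PySem.Dict String Int :=
    letters.foldl (fun d p => d.insert p.1 0) PySem.Dict.empty
  let letters_counts :=
    hack.toList.foldl (fun d ch =>
      if d.contains (String.ofList [ch]) then d.modify (String.ofList [ch]) 0 (fun v => v + 1) else d)
      letters_counts
  let phrases_counts : PySem.Dict String Int :=
    phrases.foldl (fun d p => d.insert p.1 0) PySem.Dict.empty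
  let phrases_counts :=
    phrases_counts.keys.foldl (fun d k => d.insert k ((PySem.Str.count hack k : Int))) phrases_counts
  let letters_score :=
    letters.foldl (fun acc p => acc + p.2 * (PySem.List.pyRange 0 (letters_counts.getD p.1 0 + 1)).sum) 0
  let phrases_score :=
    phrases.foldl (fun acc p => acc + p.2 * phrases_counts.getD p.1 0) 0
  letters_score + phrases_score

-- ===== PORT B =====
def hack_calculator_extra_alt (hack : String) (letters : List (String × Int)) (phrases : List (String × Int)) : Int :=
  let st :=
    hack.toList.foldl (fun (st : PySem.Dict String Int × Int) ch =>
      match letters.find? (fun q => q.1 == String.ofList [ch]) with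
      | some q =>
        let c := st.1.getD (String.ofList [ch]) 0 + 1
        (st.1.insert (String.ofList [ch]) c, st.2 + q.2 * c)
      | none => st)
      (PySem.Dict.empty, 0)
  phrases.foldl (fun acc p => acc + p.2 * (PySem.Str.count hack p.1 : Int)) st.2

-- ===== PRECONDITION & SPEC =====
-- A Python dict cannot contain a duplicate key, so association lists with a repeated key in
-- `letters` or `phrases` represent no actual input of A; Pre_ excludes exactly those lists.
def Pre_hack_calculator_extra (hack : String) (letters : List (String × Int)) (phrases : List (String × Int)) : Prop :=
  (letters.map Prod.fst).Nodup ∧ (phrases.map Prod.fst).Nodup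
instance (hack : String) (letters : List (String × Int)) (phrases : List (String × Int)) : Decidable (Pre_hack_calculator_extra hack letters phrases) := by unfold Pre_hack_calculator_extra; infer_instance

def pvWitness_hack_calculator_extra : String × (List (String × Int)) × (List (String × Int)) :=
  ("abcab", [("a", 2), ("b", 3)], [("ab", 5)])

def Spec_hack_calculator_extra (hack : String) (letters : List (String × Int)) (phrases : List (String × Int)) (out : Int) : Prop := out = hack_calculator_extra_alt hack letters phrases
instance (hack : String) (letters : List (String × Int)) (phrases : List (String × Int)) (out : Int) : Decidable (Spec_hack_calculator_extra hack letters phrases out) := by unfold Spec_hack_calculator_extra; infer_instance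

-- ===== CLAIM (what is proved, stated in full; the proofs are below) =====
def Claim_equal_hack_calculator_extra : Prop := ∀ (hack : String) (letters : List (String × Int)) (phrases : List (String × Int)), Dom_hack_calculator_extra hack letters phrases → Pre_hack_calculator_extra hack letters phrases → Spec_hack_calculator_extra hack letters phrases (hack_calculator_extra hack letters phrases)

-- ===== LEMMAS AND PROOFS =====

-- triangular value as A computes it: sum(range(n+1))
def pvT (n : Int) : Int := (PySem.List.pyRange 0 (n + 1)).sum

-- number of occurrences of the one-character string k among the characters of l
def pvCnt (l : List Char) (k : String) : Int := (l.countP (fun ch => String.ofList [ch] == k) : Int)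

-- total letter score as a function of a counts dictionary
def pvG (letters : List (String × Int)) (d : PySem.Dict String Int) : Int :=
  letters.foldl (fun s p => s + p.2 * pvT (d.getD p.1 0)) 0

theorem pvT_succ (n : Int) (h : 0 ≤ n) : pvT (n + 1) = pvT n + (n + 1) := by
  unfold pvT
  rw [PySem.List.pyRange_one_succ_right (by omega)]
  simp

theorem pvT_zero : pvT 0 = 0 := by decide

-- dict.fromkeys(…, 0): every lookup with default 0 is 0
theorem fromkeys_getD (L : List (String × Int)) :
    ∀ d : PySem.Dict String Int, (∀ k, d.getD k 0 = 0) →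
      ∀ k, (L.foldl (fun d p => d.insert p.1 0) d).getD k 0 = 0 := by
  induction L with
  | nil => intro d hd k; exact hd k
  | cons p L ih =>
      intro d hd k
      simp only [List.foldl_cons]
      refine ih _ (fun k' => ?_) k
      rw [PySem.Dict.getD_insert]
      split <;> simp [hd]

theorem empty_getD (k : String) : (PySem.Dict.empty : PySem.Dict String Int).getD k 0 = 0 := by
  simp [PySem.Dict.empty, PySem.Dict.getD, PySem.Dict.get?]

theorem empty_contains (k : String) : (PySem.Dict.empty : PySem.Dict String Int).contains k = false := by
  simp [PySem.Dict.empty, PySem.Dict.contains]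

-- dict.fromkeys: contains = membership of the key list
theorem fromkeys_contains (L : List (String × Int)) :
    ∀ (d : PySem.Dict String Int) (k : String),
      (L.foldl (fun d p => d.insert p.1 0) d).contains k
        = (d.contains k || decide (k ∈ L.map Prod.fst)) := by
  induction L with
  | nil => intro d k; simp
  | cons p L ih =>
      intro d k
      simp only [List.foldl_cons]
      rw [ih]
      rw [PySem.Dict.contains_insert]
      by_cases h : k = p.1
      · simp [h, List.mem_cons]
      · have hb : (k == p.1) = false := by simpa using h
        simp only [hb, Bool.false_or]
        congr 1
        simp [List.mem_cons, h]

-- A's counting loop: a key already present ends with its occurrence count added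
theorem condA_getD (l : List Char) :
    ∀ (d : PySem.Dict String Int) (k : String), d.contains k = true →
      (l.foldl (fun d ch =>
        if d.contains (String.ofList [ch]) then d.modify (String.ofList [ch]) 0 (fun v => v + 1) else d) d).getD k 0
        = d.getD k 0 + pvCnt l k := by
  induction l with
  | nil => intro d k _; simp [pvCnt]
  | cons ch l ih =>
      intro d k hk
      simp only [List.foldl_cons]
      by_cases hg : d.contains (String.ofList [ch])
      · rw [if_pos hg]
        have hc : (d.modify (String.ofList [ch]) 0 (fun v => v + 1)).contains k = true := by
          rw [PySem.Dict.contains_modify]; simp [hk]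
        rw [ih _ _ hc]
        by_cases he : k = String.ofList [ch]
        · subst he
          rw [PySem.Dict.getD_modify_self]
          simp [pvCnt]
          ring
        · rw [PySem.Dict.getD_modify_of_ne _ _ _ he]
          have : (String.ofList [ch] == k) = false := by
            simp; exact fun h => he h.symm
          simp [pvCnt, this]
      · rw [if_neg hg, ih _ _ hk]
        have he : ¬ (String.ofList [ch] = k) := by
          intro h; rw [h] at hg; exact hg hk
        have : (String.ofList [ch] == k) = false := by simpa using he
        simp [pvCnt, this]

-- a fold of inserts over keys not containing k leaves getD k unchanged
theorem insfold_getD_notmem (f : String → Int) (ks : List String) :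
    ∀ (d : PySem.Dict String Int) (k : String), k ∉ ks →
      (ks.foldl (fun d k => d.insert k (f k)) d).getD k 0 = d.getD k 0 := by
  induction ks with
  | nil => intro d k _; rfl
  | cons a ks ih =>
      intro d k hk
      simp only [List.foldl_cons]
      rw [ih _ _ (by simp at hk; exact hk.2)]
      rw [PySem.Dict.getD_insert, if_neg (by simp at hk; exact hk.1)]

-- a fold of inserts over distinct keys: a key in the list ends with its inserted value
theorem insfold_getD_mem (f : String → Int) (ks : List String) :
    ∀ (d : PySem.Dict String Int) (k : String), ks.Nodup → k ∈ ks →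
      (ks.foldl (fun d k => d.insert k (f k)) d).getD k 0 = f k := by
  induction ks with
  | nil => intro d k _ hk; cases hk
  | cons a ks ih =>
      intro d k hnd hk
      simp only [List.foldl_cons]
      rcases List.mem_cons.mp hk with h | h
      · subst h
        rw [insfold_getD_notmem _ _ _ _ (by simp at hnd; exact hnd.1)]
        rw [PySem.Dict.getD_insert, if_pos rfl]
      · exact ih _ _ (by simp at hnd; exact hnd.2) h

-- B's find?: characterize success and failure
theorem find?_key (letters : List (String × Int)) (k : String) (q : String × Int)
    (h : letters.find? (fun q => q.1 == k) = some q) : q ∈ letters ∧ q.1 = k := by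
  refine ⟨List.mem_of_find?_eq_some h, ?_⟩
  have := List.find?_some h
  simpa using this

-- pvG after inserting the incremented count of one present key
theorem pvG_map_insert (letters : List (String × Int)) (p : String × Int)
    (d : PySem.Dict String Int) (c : Int)
    (hl : (letters.map Prod.fst).Nodup) (hp : p ∈ letters) :
    (letters.map (fun q => q.2 * pvT ((d.insert p.1 c).getD q.1 0))).sum
      = (letters.map (fun q => q.2 * pvT (d.getD q.1 0))).sum - p.2 * pvT (d.getD p.1 0) + p.2 * pvT c := by
  induction letters with
  | nil => cases hp
  | cons a L ih =>
      simp only [List.map_cons, List.sum_cons]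
      rcases List.mem_cons.mp hp with h | h
      · subst h
        rw [List.map_cons] at hl
        have hnot : p.1 ∉ L.map Prod.fst := (List.nodup_cons.mp hl).1
        have htail : (L.map (fun q => q.2 * pvT ((d.insert p.1 c).getD q.1 0))).sum
            = (L.map (fun q => q.2 * pvT (d.getD q.1 0))).sum := by
          refine congrArg List.sum (List.map_congr_left ?_)
          intro q hq
          have hne : q.1 ≠ p.1 := by
            intro he; exact hnot (he ▸ List.mem_map_of_mem hq)
          rw [PySem.Dict.getD_insert, if_neg hne]
        rw [htail, PySem.Dict.getD_insert, if_pos rfl]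
        ring
      · rw [List.map_cons] at hl
        have hne : a.1 ≠ p.1 := by
          intro he
          exact (List.nodup_cons.mp hl).1 (by rw [he]; exact List.mem_map_of_mem h)
        rw [PySem.Dict.getD_insert, if_neg hne]
        rw [ih (List.nodup_cons.mp hl).2 h]
        ring

-- B's fused loop: final score = initial score + (pvG of final counts − pvG of initial counts)
theorem B_loop (letters : List (String × Int)) (hl : (letters.map Prod.fst).Nodup) (l : List Char) :
    ∀ (d : PySem.Dict String Int) (acc : Int), (∀ k, 0 ≤ d.getD k 0) →
      (l.foldl (fun (st : PySem.Dict String Int × Int) ch =>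
        match letters.find? (fun q => q.1 == String.ofList [ch]) with
        | some q =>
          let c := st.1.getD (String.ofList [ch]) 0 + 1
          (st.1.insert (String.ofList [ch]) c, st.2 + q.2 * c)
        | none => st) (d, acc)).2
      = acc - pvG letters d
          + pvG letters (l.foldl (fun (st : PySem.Dict String Int × Int) ch =>
              match letters.find? (fun q => q.1 == String.ofList [ch]) with
              | some q =>
                let c := st.1.getD (String.ofList [ch]) 0 + 1
                (st.1.insert (String.ofList [ch]) c, st.2 + q.2 * c)
              | none => st) (d, acc)).1 := by
  induction l with
  | nil => intro d acc _; simp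
  | cons ch l ih =>
      intro d acc hpos
      simp only [List.foldl_cons]
      cases hfind : letters.find? (fun q => q.1 == String.ofList [ch]) with
      | none => exact ih d acc hpos
      | some q =>
          obtain ⟨hq, hqk⟩ := find?_key letters (String.ofList [ch]) q hfind
          have hpos' : ∀ k, 0 ≤ (d.insert (String.ofList [ch]) (d.getD (String.ofList [ch]) 0 + 1)).getD k 0 := by
            intro k; rw [PySem.Dict.getD_insert]
            split
            · have := hpos (String.ofList [ch]); omega
            · exact hpos k
          rw [ih _ _ hpos']
          have hG : pvG letters (d.insert (String.ofList [ch]) (d.getD (String.ofList [ch]) 0 + 1))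
              = pvG letters d + q.2 * (d.getD (String.ofList [ch]) 0 + 1) := by
            unfold pvG
            rw [PySem.List.foldl_add, PySem.List.foldl_add]
            rw [← hqk] at *
            rw [pvG_map_insert letters q d _ hl hq]
            have h0 : 0 ≤ d.getD q.1 0 := hpos q.1
            rw [pvT_succ _ h0]
            ring
          rw [hG]
          ring

-- B's fused loop: final count of a key of `letters` is its occurrence count
theorem B_counts (letters : List (String × Int)) (l : List Char) :
    ∀ (d : PySem.Dict String Int) (acc : Int) (k : String), k ∈ letters.map Prod.fst →
      (l.foldl (fun (st : PySem.Dict String Int × Int) ch =>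
        match letters.find? (fun q => q.1 == String.ofList [ch]) with
        | some q =>
          let c := st.1.getD (String.ofList [ch]) 0 + 1
          (st.1.insert (String.ofList [ch]) c, st.2 + q.2 * c)
        | none => st) (d, acc)).1.getD k 0
      = d.getD k 0 + pvCnt l k := by
  induction l with
  | nil => intro d acc k _; simp [pvCnt]
  | cons ch l ih =>
      intro d acc k hk
      simp only [List.foldl_cons]
      cases hfind : letters.find? (fun q => q.1 == String.ofList [ch]) with
      | none =>
          have hne : ¬ (String.ofList [ch] = k) := by
            intro he
            obtain ⟨q, hq, hq1⟩ := List.mem_map.mp hk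
            have := List.find?_eq_none.mp hfind q hq
            apply this
            simp [hq1, he]
          have : (String.ofList [ch] == k) = false := by simpa using hne
          rw [ih _ _ _ hk]
          simp [pvCnt, this]
      | some q =>
          rw [ih _ _ _ hk]
          by_cases he : String.ofList [ch] = k
          · subst he
            rw [PySem.Dict.getD_insert, if_pos rfl]
            simp [pvCnt]
            ring
          · rw [PySem.Dict.getD_insert, if_neg (fun h => he h.symm)]
            have : (String.ofList [ch] == k) = false := by simpa using he
            simp [pvCnt, this]

-- ===== VERDICT (by name: the statement is the Claim_ definition above) =====
theorem hack_calculator_extra_spec : Claim_equal_hack_calculator_extra := by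
  intro hack letters phrases _ hpre
  obtain ⟨hl, hp⟩ := hpre
  show hack_calculator_extra hack letters phrases = hack_calculator_extra_alt hack letters phrases
  have hA : hack_calculator_extra hack letters phrases
      = (letters.foldl (fun acc p => acc + p.2 * (PySem.List.pyRange 0
            ((hack.toList.foldl (fun d ch =>
                if d.contains (String.ofList [ch]) then d.modify (String.ofList [ch]) 0 (fun v => v + 1) else d)
              (letters.foldl (fun d p => d.insert p.1 0) PySem.Dict.empty)).getD p.1 0 + 1)).sum) 0)
        + (phrases.foldl (fun acc p => acc + p.2 *
            (((phrases.foldl (fun d p => d.insert p.1 0) (PySem.Dict.empty : PySem.Dict String Int)).keys).foldl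
                (fun d k => d.insert k ((PySem.Str.count hack k : Int)))
              (phrases.foldl (fun d p => d.insert p.1 0) PySem.Dict.empty)).getD p.1 0) 0) := rfl
  have hB : hack_calculator_extra_alt hack letters phrases
      = phrases.foldl (fun acc p => acc + p.2 * (PySem.Str.count hack p.1 : Int))
          (hack.toList.foldl (fun (st : PySem.Dict String Int × Int) ch =>
              match letters.find? (fun q => q.1 == String.ofList [ch]) with
              | some q =>
                let c := st.1.getD (String.ofList [ch]) 0 + 1
                (st.1.insert (String.ofList [ch]) c, st.2 + q.2 * c)
              | none => st)
            (PySem.Dict.empty, 0)).2 := rfl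
  rw [hA, hB]
  set lc0 : PySem.Dict String Int := letters.foldl (fun d p => d.insert p.1 0) PySem.Dict.empty with hlc0
  set lc := hack.toList.foldl (fun d ch =>
      if d.contains (String.ofList [ch]) then d.modify (String.ofList [ch]) 0 (fun v => v + 1) else d) lc0 with hlc
  set pc0 : PySem.Dict String Int := phrases.foldl (fun d p => d.insert p.1 0) PySem.Dict.empty with hpc0
  set pc := pc0.keys.foldl (fun d k => d.insert k ((PySem.Str.count hack k : Int))) pc0 with hpc
  -- A's letter counts are the character counts, for keys of letters
  have hlcount : ∀ p ∈ letters, lc.getD p.1 0 = pvCnt hack.toList p.1 := by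
    intro p hp'
    have hcont : lc0.contains p.1 = true := by
      rw [hlc0, fromkeys_contains, empty_contains]
      simp only [Bool.false_or, decide_eq_true_eq]
      exact List.mem_map_of_mem hp'
    rw [hlc, condA_getD _ _ _ hcont]
    rw [hlc0, fromkeys_getD _ _ empty_getD]
    ring
  -- A's phrase counts are the substring counts, for keys of phrases
  have hpcount : ∀ p ∈ phrases, pc.getD p.1 0 = (PySem.Str.count hack p.1 : Int) := by
    intro p hp'
    have hmem : p.1 ∈ pc0.keys := by
      refine (PySem.Dict.contains_iff_mem_keys _ _).mp ?_
      rw [hpc0, fromkeys_contains, empty_contains]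
      simp only [Bool.false_or, decide_eq_true_eq]
      exact List.mem_map_of_mem hp'
    have hnd : pc0.keys.Nodup := by
      rw [hpc0]
      exact PySem.Dict.nodup_keys_foldl_insert_key phrases Prod.fst (fun _ _ => (0 : Int))
        PySem.Dict.empty (by simp [PySem.Dict.empty, PySem.Dict.keys])
    rw [hpc]
    exact insfold_getD_mem _ _ _ _ hnd hmem
  -- reduce B's fused loop
  rw [B_loop letters hl hack.toList PySem.Dict.empty 0 (fun k => by rw [empty_getD])]
  have hGempty : pvG letters (PySem.Dict.empty : PySem.Dict String Int) = 0 := by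
    unfold pvG
    rw [PySem.List.foldl_add]
    have : letters.map (fun p => p.2 * pvT ((PySem.Dict.empty : PySem.Dict String Int).getD p.1 0))
        = letters.map (fun _ => (0 : Int)) := by
      refine List.map_congr_left fun q _ => ?_
      rw [empty_getD, pvT_zero]; ring
    rw [this]
    simp
  rw [hGempty]
  have hGfinal : pvG letters (hack.toList.foldl (fun (st : PySem.Dict String Int × Int) ch =>
        match letters.find? (fun q => q.1 == String.ofList [ch]) with
        | some q =>
          let c := st.1.getD (String.ofList [ch]) 0 + 1
          (st.1.insert (String.ofList [ch]) c, st.2 + q.2 * c)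
        | none => st) (PySem.Dict.empty, 0)).1
      = letters.foldl (fun acc p => acc + p.2 * (PySem.List.pyRange 0 (lc.getD p.1 0 + 1)).sum) 0 := by
    unfold pvG
    refine PySem.List.foldl_congr_mem _ _ _ _ ?_
    intro acc p hp'
    rw [B_counts letters hack.toList _ _ _ (List.mem_map_of_mem hp'), empty_getD, hlcount p hp']
    simp [pvT]
  rw [hGfinal]
  rw [PySem.List.foldl_add (phrases) (fun p => p.2 * (PySem.Str.count hack p.1 : Int))]
  rw [PySem.List.foldl_add (phrases) (fun p => p.2 * pc.getD p.1 0)]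
  have hmaps : phrases.map (fun p => p.2 * pc.getD p.1 0)
      = phrases.map (fun p => p.2 * (PySem.Str.count hack p.1 : Int)) :=
    List.map_congr_left fun p hp' => by rw [hpcount p hp']
  rw [hmaps]
  ring
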